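-- pv_equiv track=rewrite | github.com/TApplencourt/mkl-verbose-toolkit | mvt/parse.py | tokenizer_mkl_arg
-- ===== SOURCE A (Python) =====
-- def tokenizer_mkl_arg(argument):
--     '''
--     >>> list(tokenizer_mkl_arg("SGEMM(N,N,3072,3072,62,0x7ffe51792158,0x3193990,3072,0x32539a0,64,0x7ffe51792170,0x7fddd45a7080,3072)"))
--     [(0, 'N'), (1, 'N'), (2, '3072'), (3, '3072'), (4, '62'), (7, '3072'), (9, '64'), (12, '3072')]
--     >>> list(tokenizer_mkl_arg("PDPOTRF(l,1024,(nil),1,1,0x7fff5c591294,0,nb={1024,1024},myid={8,0},process_grid={32,1})"))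
--     [(0, 'l'), (1, '1024'), (2, 'nil'), (3, '1'), (4, '1'), (6, '0')]
--     '''
--     inside_tuple = False
--     count = 0
--     old = 0
--     active = False
--
--     # Super ugly, to refractor. Gramar and have fun?
--     for i, char in enumerate(argument):
--
--         if char in ",)" and not inside_tuple and active:
--             arg = argument[old:i]
--             if argument[old:old+2] != '0x' and not arg.startswith('{'):
--                 yield count, arg
--             count += 1
--             active = False
--
--         if char in '(=,' and not inside_tuple:
--             old = i+1
--             active = True
--         elif char == '{':
--             inside_tuple = True
--         elif char == '}':
--             inside_tuple = False
-- ===== SOURCE B (Python) =====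
-- def tokenizer_mkl_arg(argument):
--     # Pass 1: collect every top-level field (text between '('/'='/',' and the
--     # next top-level ','/')'), ignoring commas inside a {...} group.
--     fields = []
--     in_braces = False
--     start = None
--     for i, ch in enumerate(argument):
--         if in_braces:
--             if ch == '}':
--                 in_braces = False
--         elif ch == '{':
--             in_braces = True
--         elif ch in '(=,':
--             if ch == ',' and start is not None:
--                 fields.append(argument[start:i])
--             start = i + 1
--         elif ch == ')':
--             if start is not None:
--                 fields.append(argument[start:i])
--                 start = None
--     # Pass 2: enumerate all fields, emit only the scalar ones.
--     for idx, f in enumerate(fields):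
--         if not f.startswith('0x') and not f.startswith('{'):
--             yield idx, f
-- ===== Notes on version B (the rewrite author's own statement) =====
-- stated objective: alternative
-- what changed: A's single incremental state machine that filters, counts and yields while scanning is replaced by a two-phase decomposition: a brace-aware splitter first collects all top-level fields, then a separate enumerate-and-filter pass emits the scalar ones (A's argument[old:old+2] != '0x' check becomes a plain startswith).
import Mathlib
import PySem

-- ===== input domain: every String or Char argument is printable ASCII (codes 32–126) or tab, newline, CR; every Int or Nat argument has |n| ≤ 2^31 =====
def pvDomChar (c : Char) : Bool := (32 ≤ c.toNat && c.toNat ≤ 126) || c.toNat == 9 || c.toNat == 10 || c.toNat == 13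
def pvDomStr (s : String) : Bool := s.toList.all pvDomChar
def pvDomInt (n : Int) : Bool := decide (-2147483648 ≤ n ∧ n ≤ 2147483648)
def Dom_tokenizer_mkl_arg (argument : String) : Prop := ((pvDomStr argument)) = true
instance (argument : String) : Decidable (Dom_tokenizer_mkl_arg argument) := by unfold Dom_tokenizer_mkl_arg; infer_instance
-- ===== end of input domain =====

-- B replaces A's single incremental yield/count/active state machine by a
-- build-all-fields pass (brace-aware splitter) followed by an enumerate-and-filter
-- pass; same O(n) cost, plainer decomposition ("alternative").

-- ===== PORT A =====
-- A is a generator; its port returns the list of yielded (count, arg) pairs.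
-- The for-loop over enumerate(argument) becomes structural recursion over the
-- remaining characters with the current index i carried along; slices
-- argument[old:i] / argument[old:old+2] (0 ≤ old, i) are exactly
-- (l.drop old).take (i-old) / (l.drop old).take 2 on the char list, and
-- arg.startswith('{') is exactly ['{'].isPrefixOf arg.
def tokenizer_mkl_arg_go (l : List Char) : List Char → Nat → Bool → Nat → Nat → Bool → List (Int × String)
  | [], _, _, _, _, _ => []
  | c :: cs, i, inside_tuple, count, old, active =>
    -- first if: char in ",)" and not inside_tuple and active
    let fire := (c == ',' || c == ')') && !inside_tuple && active
    let arg := (l.drop old).take (i - old)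
    let yld : List (Int × String) :=
      if fire then
        (if (l.drop old).take 2 ≠ ['0', 'x'] ∧ ¬ (['{'].isPrefixOf arg)
         then [((count : Int), String.mk arg)] else [])
      else []
    let count' := if fire then count + 1 else count
    let active' := if fire then false else active
    -- second if-chain: char in '(=,' / '{' / '}'
    if (c == '(' || c == '=' || c == ',') && !inside_tuple then
      yld ++ tokenizer_mkl_arg_go l cs (i + 1) inside_tuple count' (i + 1) true
    else if c == '{' then
      yld ++ tokenizer_mkl_arg_go l cs (i + 1) true count' old active'
    else if c == '}' then
      yld ++ tokenizer_mkl_arg_go l cs (i + 1) false count' old active'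
    else
      yld ++ tokenizer_mkl_arg_go l cs (i + 1) inside_tuple count' old active'

def tokenizer_mkl_arg (argument : String) : List (Int × String) :=
  tokenizer_mkl_arg_go argument.toList argument.toList 0 false 0 0 false

-- ===== PORT B =====
-- Pass 1: collect every top-level field; `start = None` becomes Option Nat.
def tokenizer_mkl_arg_fields (l : List Char) : List Char → Nat → Bool → Option Nat → List (List Char)
  | [], _, _, _ => []
  | c :: cs, i, in_braces, start =>
    if in_braces then
      if c == '}' then tokenizer_mkl_arg_fields l cs (i + 1) false start
      else tokenizer_mkl_arg_fields l cs (i + 1) in_braces start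
    else if c == '{' then
      tokenizer_mkl_arg_fields l cs (i + 1) true start
    else if c == '(' || c == '=' || c == ',' then
      match start with
      | some s =>
        if c == ',' then ((l.drop s).take (i - s)) :: tokenizer_mkl_arg_fields l cs (i + 1) in_braces (some (i + 1))
        else tokenizer_mkl_arg_fields l cs (i + 1) in_braces (some (i + 1))
      | none => tokenizer_mkl_arg_fields l cs (i + 1) in_braces (some (i + 1))
    else if c == ')' then
      match start with
      | some s => ((l.drop s).take (i - s)) :: tokenizer_mkl_arg_fields l cs (i + 1) in_braces none
      | none => tokenizer_mkl_arg_fields l cs (i + 1) in_braces none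
    else
      tokenizer_mkl_arg_fields l cs (i + 1) in_braces start

-- Pass 2: for idx, f in enumerate(fields): if not f.startswith('0x') and not f.startswith('{'): yield idx, f
def tokenizer_mkl_arg_emit : Nat → List (List Char) → List (Int × String)
  | _, [] => []
  | n, f :: fs =>
    if ¬ (['0', 'x'].isPrefixOf f) ∧ ¬ (['{'].isPrefixOf f) then
      ((n : Int), String.mk f) :: tokenizer_mkl_arg_emit (n + 1) fs
    else tokenizer_mkl_arg_emit (n + 1) fs

def tokenizer_mkl_arg_alt (argument : String) : List (Int × String) :=
  tokenizer_mkl_arg_emit 0 (tokenizer_mkl_arg_fields argument.toList argument.toList 0 false none)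

-- ===== PRECONDITION & SPEC =====
def Spec_tokenizer_mkl_arg (argument : String) (out : List (Int × String)) : Prop := out = tokenizer_mkl_arg_alt argument
instance (argument : String) (out : List (Int × String)) : Decidable (Spec_tokenizer_mkl_arg argument out) := by unfold Spec_tokenizer_mkl_arg; infer_instance

-- ===== CLAIM (what is proved, stated in full; the proofs are below) =====
def Claim_equal_tokenizer_mkl_arg : Prop := ∀ (argument : String), Dom_tokenizer_mkl_arg argument → Spec_tokenizer_mkl_arg argument (tokenizer_mkl_arg argument)

-- ===== LEMMAS AND PROOFS =====

-- A tests argument[old:old+2] != '0x' while B tests startswith on the field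
-- argument[old:i]; they agree because position i holds ',' or ')'.
lemma hex_test_eq (d cs' : List Char) (m : Nat) (c : Char)
    (hd : d.drop m = c :: cs') (hc : c = ',' ∨ c = ')') :
    (d.take 2 = ['0', 'x'] ↔ ['0', 'x'].isPrefixOf (d.take m)) := by
  match m, d with
  | 0, d =>
    simp at hd; subst hd
    rcases hc with rfl | rfl <;> simp
  | 1, [] => simp at hd
  | 1, d0 :: t =>
    simp [List.drop] at hd; subst hd
    rcases hc with rfl | rfl <;> simp [List.isPrefixOf]
  | (n+2), [] => simp at hd
  | (n+2), [d0] => simp at hd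
  | (n+2), d0 :: d1 :: t =>
    simp [List.isPrefixOf]
    constructor
    · rintro ⟨rfl, rfl⟩; exact ⟨rfl, rfl⟩
    · rintro ⟨rfl, rfl⟩; exact ⟨rfl, rfl⟩

lemma main_invariant (l : List Char) :
    ∀ cs i inside count old (st : Option Nat),
      cs = l.drop i →
      (st = some old ∧ old ≤ i) ∨ st = none →
      tokenizer_mkl_arg_go l cs i inside count old st.isSome
        = tokenizer_mkl_arg_emit count (tokenizer_mkl_arg_fields l cs i inside st) := by
  intro cs
  induction cs with
  | nil => intro i inside count old st _ _; simp [tokenizer_mkl_arg_go, tokenizer_mkl_arg_fields, tokenizer_mkl_arg_emit]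
  | cons c cs ih =>
    intro i inside count old st h hst
    have hcs : cs = l.drop (i + 1) := by
      have : l.drop (i + 1) = (l.drop i).drop 1 := by
        rw [List.drop_drop]
      rw [this, ← h]; rfl
    rcases hst with ⟨rfl, hle⟩ | rfl
    · -- start = some old (active)
      cases inside with
      | true =>
        by_cases h1 : c = '}'
        · subst h1
          simp [tokenizer_mkl_arg_go, tokenizer_mkl_arg_fields]
          exact ih (i+1) false count old (some old) hcs (Or.inl ⟨rfl, by omega⟩)
        · by_cases h2 : c = '{'
          · subst h2
            simp [tokenizer_mkl_arg_go, tokenizer_mkl_arg_fields]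
            exact ih (i+1) true count old (some old) hcs (Or.inl ⟨rfl, by omega⟩)
          · simp [tokenizer_mkl_arg_go, tokenizer_mkl_arg_fields, h1, h2]
            exact ih (i+1) true count old (some old) hcs (Or.inl ⟨rfl, by omega⟩)
      | false =>
        have hdd : ∀ cc : Char, cc = c → (l.drop old).drop (i - old) = c :: cs := by
          intro cc _
          rw [List.drop_drop, Nat.add_sub_cancel' hle, ← h]
        by_cases h1 : c = ','
        · subst h1
          have hiff := hex_test_eq (l.drop old) cs (i - old) ',' (hdd ',' rfl) (Or.inl rfl)
          have hih := ih (i+1) false (count+1) (i+1) (some (i+1)) hcs (Or.inl ⟨rfl, by omega⟩)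
          simp only [Option.isSome_some] at hih
          by_cases hpx : ['0','x'].isPrefixOf ((l.drop old).take (i - old)) <;>
            by_cases hpb : ['{'].isPrefixOf ((l.drop old).take (i - old)) <;>
            simp [tokenizer_mkl_arg_go, tokenizer_mkl_arg_fields, tokenizer_mkl_arg_emit,
                  hiff, hpx, hpb, hih]
        · by_cases h2 : c = ')'
          · subst h2
            have hiff := hex_test_eq (l.drop old) cs (i - old) ')' (hdd ')' rfl) (Or.inr rfl)
            have hih := ih (i+1) false (count+1) old none hcs (Or.inr rfl)
            simp only [Option.isSome_none] at hih
            by_cases hpx : ['0','x'].isPrefixOf ((l.drop old).take (i - old)) <;>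
              by_cases hpb : ['{'].isPrefixOf ((l.drop old).take (i - old)) <;>
              simp [tokenizer_mkl_arg_go, tokenizer_mkl_arg_fields, tokenizer_mkl_arg_emit,
                    hiff, hpx, hpb, hih]
          · by_cases h3 : c = '(' ∨ c = '='
            · have hih := ih (i+1) false count (i+1) (some (i+1)) hcs (Or.inl ⟨rfl, by omega⟩)
              simp only [Option.isSome_some] at hih
              rcases h3 with rfl | rfl <;>
                simp [tokenizer_mkl_arg_go, tokenizer_mkl_arg_fields, hih]
            · by_cases h4 : c = '{'
              · subst h4
                simp [tokenizer_mkl_arg_go, tokenizer_mkl_arg_fields]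
                exact ih (i+1) true count old (some old) hcs (Or.inl ⟨rfl, by omega⟩)
              · by_cases h5 : c = '}'
                · subst h5
                  simp [tokenizer_mkl_arg_go, tokenizer_mkl_arg_fields]
                  exact ih (i+1) false count old (some old) hcs (Or.inl ⟨rfl, by omega⟩)
                · have h3a : ¬ c = '(' := fun hh => h3 (Or.inl hh)
                  have h3b : ¬ c = '=' := fun hh => h3 (Or.inr hh)
                  simp [tokenizer_mkl_arg_go, tokenizer_mkl_arg_fields, h1, h2, h3a, h3b, h4, h5]
                  exact ih (i+1) false count old (some old) hcs (Or.inl ⟨rfl, by omega⟩)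
    · -- start = none (inactive)
      cases inside with
      | true =>
        by_cases h1 : c = '}'
        · subst h1
          simp [tokenizer_mkl_arg_go, tokenizer_mkl_arg_fields]
          exact ih (i+1) false count old none hcs (Or.inr rfl)
        · by_cases h2 : c = '{'
          · subst h2
            simp [tokenizer_mkl_arg_go, tokenizer_mkl_arg_fields]
            exact ih (i+1) true count old none hcs (Or.inr rfl)
          · simp [tokenizer_mkl_arg_go, tokenizer_mkl_arg_fields, h1, h2]
            exact ih (i+1) true count old none hcs (Or.inr rfl)
      | false =>
        by_cases h3 : c = '(' ∨ c = '=' ∨ c = ','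
        · have hih := ih (i+1) false count (i+1) (some (i+1)) hcs (Or.inl ⟨rfl, by omega⟩)
          simp only [Option.isSome_some] at hih
          rcases h3 with rfl | rfl | rfl <;>
            simp [tokenizer_mkl_arg_go, tokenizer_mkl_arg_fields, hih]
        · by_cases h4 : c = '{'
          · subst h4
            simp [tokenizer_mkl_arg_go, tokenizer_mkl_arg_fields]
            exact ih (i+1) true count old none hcs (Or.inr rfl)
          · by_cases h5 : c = '}'
            · subst h5
              simp [tokenizer_mkl_arg_go, tokenizer_mkl_arg_fields]
              exact ih (i+1) false count old none hcs (Or.inr rfl)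
            · by_cases h2 : c = ')'
              · subst h2
                simp [tokenizer_mkl_arg_go, tokenizer_mkl_arg_fields]
                exact ih (i+1) false count old none hcs (Or.inr rfl)
              · have h3a : ¬ c = '(' := fun hh => h3 (Or.inl hh)
                have h3b : ¬ c = '=' := fun hh => h3 (Or.inr (Or.inl hh))
                have h3c : ¬ c = ',' := fun hh => h3 (Or.inr (Or.inr hh))
                simp [tokenizer_mkl_arg_go, tokenizer_mkl_arg_fields, h2, h3a, h3b, h3c, h4, h5]
                exact ih (i+1) false count old none hcs (Or.inr rfl)

-- ===== VERDICT (by name: the statement is the Claim_ definition above) =====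
theorem tokenizer_mkl_arg_spec : Claim_equal_tokenizer_mkl_arg := by
  intro argument _
  show _ = _
  have h := main_invariant argument.toList argument.toList 0 false 0 0 none (by simp) (Or.inr rfl)
  simpa [tokenizer_mkl_arg, tokenizer_mkl_arg_alt] using h
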